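-- pv_equiv track=rewrite | github.com/ancalabrese/DailyProblem | FindAnagrams/findAnagrams.py | groupAnagramWords
-- ===== SOURCE A (Python) =====
-- def groupAnagramWords(stringList):
-- 	anagrams={}
-- 	for s in stringList:
-- 		sum = 0
-- 		for c in s:
-- 			sum+=ord(c)
-- 		if sum not in anagrams:
-- 			anagrams[sum] = [s]
-- 		else:
-- 			anagrams[sum].append(s)
-- 	return anagrams
-- ===== SOURCE B (Python) =====
-- def groupAnagramWords(stringList):
-- 	keys = [sum(map(ord, s)) for s in stringList]
-- 	return {k: [s for s, ks in zip(stringList, keys) if ks == k]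
-- 		for k in dict.fromkeys(keys)}
-- ===== Notes on version B (the rewrite author's own statement) =====
-- stated objective: simpler
-- what changed: Replaces A's single-pass mutable-dict bucketing (conditional insert-or-append per word) with a key list plus a dict comprehension that gathers each first-occurrence-ordered distinct key's words by filtering once per key.
import Mathlib
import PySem

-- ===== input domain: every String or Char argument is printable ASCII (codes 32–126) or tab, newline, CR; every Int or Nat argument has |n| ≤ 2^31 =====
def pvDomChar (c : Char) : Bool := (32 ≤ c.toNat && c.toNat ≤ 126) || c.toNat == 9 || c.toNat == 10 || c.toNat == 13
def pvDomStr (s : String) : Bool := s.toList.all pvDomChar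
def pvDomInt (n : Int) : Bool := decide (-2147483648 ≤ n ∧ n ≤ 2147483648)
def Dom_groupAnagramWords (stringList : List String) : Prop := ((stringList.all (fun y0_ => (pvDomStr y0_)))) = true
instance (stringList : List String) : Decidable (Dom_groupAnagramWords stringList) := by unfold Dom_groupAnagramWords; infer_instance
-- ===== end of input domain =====

-- B replaces A's single-pass conditional insert-or-append dict bucketing with a key list,
-- an ordered dedup of the keys, and one filtering pass per distinct key (simpler decomposition;
-- equivalence of the RETURN value, as an insertion-ordered association list).

-- ===== PORT A =====
def groupAnagramWords (stringList : List String) : List (Int × List String) :=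
  (stringList.foldl (fun anagrams s =>
      let sum : Int := s.toList.foldl (fun acc c => acc + (c.toNat : Int)) 0
      if anagrams.contains sum = false then anagrams.insert sum [s]
      else anagrams.modify sum [] (fun l => l ++ [s]))
    (PySem.Dict.empty : PySem.Dict Int (List String))).items

-- ===== PORT B =====
def groupAnagramWords_alt (stringList : List String) : List (Int × List String) :=
  let keys := stringList.map (fun s => (s.toList.map (fun c => (c.toNat : Int))).sum)
  (PySem.List.dedup keys).map (fun k =>
    (k, ((stringList.zip keys).filter (fun p => p.2 == k)).map (fun p => p.1)))

-- ===== PRECONDITION & SPEC =====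
def Spec_groupAnagramWords (stringList : List String) (out : List (Int × List String)) : Prop := out = groupAnagramWords_alt stringList
instance (stringList : List String) (out : List (Int × List String)) : Decidable (Spec_groupAnagramWords stringList out) := by unfold Spec_groupAnagramWords; infer_instance

-- ===== CLAIM (what is proved, stated in full; the proofs are below) =====
def Claim_equal_groupAnagramWords : Prop := ∀ (stringList : List String), Dom_groupAnagramWords stringList → Spec_groupAnagramWords stringList (groupAnagramWords stringList)

-- ===== LEMMAS AND PROOFS =====

-- the ord-sum key both programs compute
def pvKey (s : String) : Int := (s.toList.map (fun c => (c.toNat : Int))).sum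

theorem pvKey_foldl (s : String) :
    s.toList.foldl (fun acc c => acc + (c.toNat : Int)) 0 = pvKey s := by
  unfold pvKey
  induction s.toList using List.reverseRecOn with
  | nil => simp
  | append_singleton t c ih => simp [List.foldl_append, ih]

-- A's branch is exactly Python's d.modify: set [s] when absent, append when present
theorem stepA_eq_modify (d : PySem.Dict Int (List String)) (s : String) :
    (if d.contains (pvKey s) = false then d.insert (pvKey s) [s]
     else d.modify (pvKey s) [] (fun l => l ++ [s]))
      = d.modify (pvKey s) [] (fun l => l ++ [s]) := by
  by_cases h : d.contains (pvKey s) = false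
  · simp only [h, if_pos]
    have hg := PySem.Dict.getD_of_not_contains (d := d) (k := pvKey s) (d0 := ([] : List String)) h
    simp [PySem.Dict.modify, hg]
  · simp [h]

-- the zip-filter-map in B collapses to a plain filter of the input
theorem zip_filter_eq (xs : List String) (k : Int) :
    ((xs.zip (xs.map pvKey)).filter (fun p => p.2 == k)).map (fun p => p.1)
      = xs.filter (fun s => pvKey s == k) := by
  induction xs with
  | nil => rfl
  | cons x t ih =>
      by_cases h : pvKey x == k
      · simp [List.filter, h, ih]
      · simp [List.filter, h, ih]

-- the pair-list fold's filter collapses the same way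
theorem pairs_filter_eq (xs : List String) (k : Int) :
    (((xs.map (fun s => (pvKey s, s))).filter (fun p => p.1 == k)).map (fun p => p.2))
      = xs.filter (fun s => pvKey s == k) := by
  induction xs with
  | nil => rfl
  | cons x t ih =>
      by_cases h : pvKey x == k
      · simp [List.filter, h, ih]
      · simp [List.filter, h, ih]

-- ===== VERDICT (by name: the statement is the Claim_ definition above) =====
theorem groupAnagramWords_spec : Claim_equal_groupAnagramWords := by
  intro xs _
  unfold Spec_groupAnagramWords groupAnagramWords groupAnagramWords_alt
  dsimp only
  -- rewrite A's loop body into a single modify over the key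
  have hbody : ∀ (d : PySem.Dict Int (List String)) (s : String),
      (let sum : Int := s.toList.foldl (fun acc c => acc + (c.toNat : Int)) 0
       if d.contains sum = false then d.insert sum [s]
       else d.modify sum [] (fun l => l ++ [s]))
        = d.modify (pvKey s) [] (fun l => l ++ [s]) := by
    intro d s
    simp only [pvKey_foldl]
    exact stepA_eq_modify d s
  have hfun : (fun (anagrams : PySem.Dict Int (List String)) (s : String) =>
      let sum : Int := s.toList.foldl (fun acc c => acc + (c.toNat : Int)) 0
      if anagrams.contains sum = false then anagrams.insert sum [s]
      else anagrams.modify sum [] (fun l => l ++ [s]))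
      = fun d s => d.modify (pvKey s) [] (fun l => l ++ [s]) := by
    funext d s; exact hbody d s
  rw [hfun]
  -- view the loop as a fold over (key, word) pairs
  have hmap : xs.foldl (fun d s => d.modify (pvKey s) [] (fun l => l ++ [s]))
        (PySem.Dict.empty : PySem.Dict Int (List String))
      = (xs.map (fun s => (pvKey s, s))).foldl
          (fun d p => d.modify p.1 [] (fun l => l ++ [p.2])) PySem.Dict.empty := by
    rw [List.foldl_map]
  rw [hmap]
  set l := xs.map (fun s => (pvKey s, s)) with hl
  have hnd : ((l.foldl (fun d p => d.modify p.1 [] (fun l => l ++ [p.2]))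
      (PySem.Dict.empty : PySem.Dict Int (List String))).keys).Nodup := by
    have := PySem.Dict.nodup_keys_foldl_modify_key (l := l) (key := fun (p : Int × String) => p.1)
      (d0 := ([] : List String)) (f := fun (_ : PySem.Dict Int (List String)) (p : Int × String) (acc : List String) => acc ++ [p.2])
      (d := (PySem.Dict.empty : PySem.Dict Int (List String)))
      (by simp [PySem.Dict.keys_empty])
    simpa using this
  rw [PySem.Dict.items_eq_map_keys _ hnd []]
  have hkeys : (l.foldl (fun d p => d.modify p.1 [] (fun l => l ++ [p.2]))
      (PySem.Dict.empty : PySem.Dict Int (List String))).keys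
      = PySem.List.dedup (xs.map pvKey) := by
    have := PySem.Dict.keys_foldl_modify_key (l := l) (key := fun (p : Int × String) => p.1)
      (d0 := ([] : List String)) (f := fun (_ : PySem.Dict Int (List String)) (p : Int × String) (acc : List String) => acc ++ [p.2])
      (d := (PySem.Dict.empty : PySem.Dict Int (List String)))
    simp only [PySem.Dict.keys_empty] at this
    rw [this, PySem.List.dedup_eq_ofList, PySem.Set.update_nil_left, hl]
    simp only [List.map_map]; rfl
  rw [hkeys]
  apply List.map_congr_left
  intro k hk
  have hgd : (l.foldl (fun d p => d.modify p.1 [] (fun l => l ++ [p.2]))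
      (PySem.Dict.empty : PySem.Dict Int (List String))).getD k []
      = (l.filter (fun p => p.1 == k)).map (fun p => p.2) := by
    have := PySem.Dict.getD_foldl_modify_append (l := l)
      (d := (PySem.Dict.empty : PySem.Dict Int (List String))) (c := k)
    simpa [PySem.Dict.getD_empty] using this
  rw [hgd, hl, pairs_filter_eq, ← zip_filter_eq]
  rfl
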